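-- pv_equiv track=rewrite | github.com/botcity-dev/botcity-framework-web-python | botcity/web/parsers.py | sanitize_header
-- ===== SOURCE A (Python) =====
-- import collections
-- import string
-- from typing import Dict, List, Optional
--
-- def sanitize_header(labels: List[str]):
--     """Sanitize header labels."""
--     # Handle Treat Empty Header
--     for idx, label in enumerate(labels):
--         if label.strip():
--             # make it lowercase
--             label = label.lower()
--
--             # remove punctuations
--             label = ''.join([l for l in label if l not in string.punctuation])  # noqa: E741
--
--             # replace spaces with underscores
--             label = label.replace(" ", "_")
--         else:
--             label = f"col_{idx}"
--         labels[idx] = label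
--
--     # Deduplicate by adding _1, _2, _3 to repeated labels
--     counts = {k: v for k, v in collections.Counter(labels).items() if v > 1}
--     for i in reversed(range(len(labels))):
--         item = labels[i]
--         if item in counts and counts[item]:
--             labels[i] = f"{item}_{counts[item]}"
--             counts[item] -= 1
--
--     return labels
-- ===== SOURCE B (Python) =====
-- import string
--
--
-- def _normalize(idx, label):
--     """One label, normalized (empty -> col_<idx>)."""
--     if not label.strip():
--         return f"col_{idx}"
--     label = label.lower()
--     label = ''.join(c for c in label if c not in string.punctuation)
--     return label.replace(" ", "_")
--
--
-- def sanitize_header(labels):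
--     """Sanitize header labels (mutates `labels` in place and returns it)."""
--     for idx, label in enumerate(labels):
--         labels[idx] = _normalize(idx, label)
--
--     # Deduplicate via an inverted index: group the positions of each label,
--     # then rewrite every duplicated group in one shot with suffixes _1.._k.
--     positions = {}
--     for idx, label in enumerate(labels):
--         positions.setdefault(label, []).append(idx)
--     for label, idxs in positions.items():
--         if len(idxs) > 1:
--             for k, i in enumerate(idxs):
--                 labels[i] = f"{label}_{k + 1}"
--     return labels
-- ===== Notes on version B (the rewrite author's own statement) =====
-- stated objective: alternative
-- what changed: A deduplicates with a Counter of totals and a reverse pass that decrements per-label remaining counts; B keeps no counts at all: it builds an inverted index mapping each normalized label to its list of positions, then rewrites each duplicated group in one shot with suffixes _1.._k; the list is still mutated in place and returned.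
import Mathlib
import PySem

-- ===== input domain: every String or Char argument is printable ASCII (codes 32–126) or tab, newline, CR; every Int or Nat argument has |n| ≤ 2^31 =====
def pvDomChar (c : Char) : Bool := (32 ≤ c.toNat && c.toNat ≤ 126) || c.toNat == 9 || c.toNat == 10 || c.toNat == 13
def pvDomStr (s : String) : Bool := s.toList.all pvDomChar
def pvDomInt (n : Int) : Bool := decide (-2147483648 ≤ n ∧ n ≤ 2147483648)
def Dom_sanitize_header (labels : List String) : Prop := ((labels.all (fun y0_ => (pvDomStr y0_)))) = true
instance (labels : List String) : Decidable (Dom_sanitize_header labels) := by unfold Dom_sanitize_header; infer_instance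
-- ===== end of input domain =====

-- B replaces A's Counter-of-totals + reverse decrementing dedup pass by an inverted index
-- (label -> list of its positions) whose duplicated groups are rewritten with suffixes _1.._k;
-- alternative structure, same cost. Both A and B mutate the Python argument list in place and
-- return it; the equivalence proved here is about the return value.

-- string.punctuation
def pvPunct : List Char := "!\"#$%&'()*+,-./:;<=>?@[\\]^_`{|}~".toList

-- ===== PORT A =====
def sanitize_header (labels : List String) : List String :=
  -- phase 1: for idx, label in enumerate(labels): … labels[idx] = label
  let labels1 := (PySem.List.enumerate labels).foldl
    (fun acc p =>
      let label :=
        if PySem.Str.strip p.2 ≠ "" then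
          let l1 := PySem.Str.lower p.2
          -- ''.join([l for l in label if l not in string.punctuation])
          let l2 := String.ofList (l1.toList.filter (fun c => !(pvPunct.contains c)))
          PySem.Str.replace l2 " " "_"
        else "col_" ++ PySem.Int.toStr p.1
      acc.set p.1.toNat label) labels
  -- counts = {k: v for k, v in collections.Counter(labels).items() if v > 1}
  let counts := ((PySem.Dict.counter labels1).items.filter (fun kv => decide (1 < kv.2))).foldl
    (fun d kv => d.insert kv.1 kv.2) PySem.Dict.empty
  -- for i in reversed(range(len(labels))): …
  let res := ((PySem.List.pyRange 0 (labels1.length : Int) 1).reverse).foldl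
    (fun (st : List String × PySem.Dict String Int) i =>
      let item := PySem.List.pyGetD st.1 i ""
      if st.2.contains item && decide (st.2.getD item 0 ≠ 0) then
        (st.1.set i.toNat (item ++ "_" ++ PySem.Int.toStr (st.2.getD item 0)),
         st.2.insert item (st.2.getD item 0 - 1))
      else st)
    (labels1, counts)
  res.1

-- ===== PORT B =====
-- B-side helper: _normalize(idx, label)
def pvNormalize (idx : Int) (label : String) : String :=
  if PySem.Str.strip label = "" then "col_" ++ PySem.Int.toStr idx
  else
    let l1 := PySem.Str.lower label
    let l2 := String.ofList (l1.toList.filter (fun c => !(pvPunct.contains c)))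
    PySem.Str.replace l2 " " "_"

def sanitize_header_alt (labels : List String) : List String :=
  -- for idx, label in enumerate(labels): labels[idx] = _normalize(idx, label)
  let labels1 := (PySem.List.enumerate labels).foldl
    (fun acc p => acc.set p.1.toNat (pvNormalize p.1 p.2)) labels
  -- positions = {}; for idx, label in enumerate(labels): positions.setdefault(label, []).append(idx)
  let positions := (PySem.List.enumerate labels1).foldl
    (fun (d : PySem.Dict String (List Int)) p => d.modify p.2 [] (· ++ [p.1]))
    PySem.Dict.empty
  -- for label, idxs in positions.items(): if len(idxs) > 1: for k, i in enumerate(idxs): labels[i] = f"{label}_{k+1}"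
  positions.items.foldl
    (fun acc kv =>
      if decide (1 < kv.2.length) then
        (PySem.List.enumerate kv.2).foldl
          (fun acc2 q => PySem.List.pySetD acc2 q.2 (kv.1 ++ "_" ++ PySem.Int.toStr (q.1 + 1)))
          acc
      else acc)
    labels1

-- ===== PRECONDITION & SPEC =====
def Spec_sanitize_header (labels : List String) (out : List String) : Prop := out = sanitize_header_alt labels
instance (labels : List String) (out : List String) : Decidable (Spec_sanitize_header labels out) := by unfold Spec_sanitize_header; infer_instance

-- ===== CLAIM (what is proved, stated in full; the proofs are below) =====
def Claim_equal_sanitize_header : Prop := ∀ (labels : List String), Dom_sanitize_header labels → Spec_sanitize_header labels (sanitize_header labels)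

-- ===== LEMMAS AND PROOFS =====

-- the expected deduplicated list: at each position, a label x with tot x > 1 gets the
-- suffix (count of x in the prefix so far) + 1 + e x
def pvExp (tot : String → Int) (e : String → Int) : List String → List String → List String
  | _, [] => []
  | pre, x :: s =>
    (if 1 < tot x then x ++ "_" ++ PySem.Int.toStr ((pre.count x : Int) + 1 + e x) else x)
      :: pvExp tot e (pre ++ [x]) s

theorem pvNormalize_eq (p : Int × String) :
    pvNormalize p.1 p.2 =
      (if PySem.Str.strip p.2 ≠ "" then
        let l1 := PySem.Str.lower p.2
        let l2 := String.ofList (l1.toList.filter (fun c => !(pvPunct.contains c)))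
        PySem.Str.replace l2 " " "_"
      else "col_" ++ PySem.Int.toStr p.1) := by
  by_cases h : PySem.Str.strip p.2 = "" <;> simp [pvNormalize, h]

theorem pvExp_append_singleton (tot e : String → Int) :
    ∀ (s : List String) (pre : List String) (x : String),
      pvExp tot e pre (s ++ [x]) =
        pvExp tot e pre s ++
          [if 1 < tot x then x ++ "_" ++ PySem.Int.toStr (((pre ++ s).count x : Int) + 1 + e x) else x] := by
  intro s
  induction s with
  | nil => intro pre x; simp [pvExp]
  | cons y s ih => intro pre x; simp [pvExp, ih (pre ++ [y]) x]

theorem pvExp_length (tot e : String → Int) :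
    ∀ (s pre : List String), (pvExp tot e pre s).length = s.length := by
  intro s
  induction s with
  | nil => intro pre; simp [pvExp]
  | cons x s ih => intro pre; simp [pvExp, ih]

theorem pvExp_getElem? (tot e : String → Int) :
    ∀ (s pre : List String) (j : Nat), (hj : j < s.length) →
      (pvExp tot e pre s)[j]? =
        some (if 1 < tot s[j] then
                s[j] ++ "_" ++ PySem.Int.toStr (((pre ++ s.take j).count s[j] : Int) + 1 + e s[j])
              else s[j]) := by
  intro s
  induction s with
  | nil => intro pre j hj; simp at hj
  | cons x s ih =>
    intro pre j hj
    cases j with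
    | zero => simp [pvExp]
    | succ j =>
      have hj' : j < s.length := by simpa using hj
      simp only [pvExp, List.getElem?_cons_succ, ih (pre ++ [x]) j hj']
      simp [List.take_succ_cons, List.append_assoc]

-- A's reverse pass computes pvExp
theorem pvA_go (tot : String → Int) (e : String → Int) (he : ∀ x, 0 ≤ e x) :
    ∀ (zs tail : List String) (counts : PySem.Dict String Int),
      (∀ x, counts.contains x = decide (1 < tot x)) →
      (∀ x, 1 < tot x → counts.getD x 0 = (zs.count x : Int) + e x) →
      ((List.range zs.length).foldr
        (fun (k : Nat) (st : List String × PySem.Dict String Int) =>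
          let item := PySem.List.pyGetD st.1 (k : Int) ""
          if st.2.contains item && decide (st.2.getD item 0 ≠ 0) then
            (st.1.set (k : Int).toNat (item ++ "_" ++ PySem.Int.toStr (st.2.getD item 0)),
             st.2.insert item (st.2.getD item 0 - 1))
          else st)
        (zs ++ tail, counts)).1
      = pvExp tot e [] zs ++ tail := by
  intro zs
  induction zs using List.reverseRecOn with
  | nil => intro tail counts hc hv; simp [pvExp]
  | append_singleton ws x ih =>
    intro tail counts hc hv
    have hitem : PySem.List.pyGetD ((ws ++ [x]) ++ tail) ((ws.length : Nat) : Int) "" = x := by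
      rw [PySem.List.pyGetD_natCast]
      simp [List.append_assoc, List.getD_eq_getElem?_getD]
    have hset : ∀ y, ((ws ++ [x]) ++ tail).set ws.length y = ws ++ (y :: tail) := by
      intro y
      simp [List.append_assoc, List.set_cons_zero]
    rw [List.length_append, List.length_singleton, List.range_succ, List.foldr_append]
    simp only [List.foldr_cons, List.foldr_nil, hitem, Int.toNat_natCast, hset]
    by_cases hx : 1 < tot x
    · have hcont : counts.contains x = true := by rw [hc x]; simpa using hx
      have hval : counts.getD x 0 = ((ws.count x : Int) + 1) + e x := by
        rw [hv x hx]; simp [List.count_append]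
      have hne : counts.getD x 0 ≠ 0 := by
        have h1 := he x; rw [hval]; omega
      rw [if_pos (by simp [hcont, hne])]
      have hrec := ih ((x ++ "_" ++ PySem.Int.toStr (counts.getD x 0)) :: tail)
        (counts.insert x (counts.getD x 0 - 1))
        (by
          intro y
          by_cases hyx : y = x
          · subst hyx; simp [hx]
          · simp [PySem.Dict.contains_insert, hyx, hc y])
        (by
          intro y hy
          by_cases hyx : y = x
          · subst hyx
            rw [PySem.Dict.getD_insert_self, hval]; ring
          · rw [PySem.Dict.getD_insert, if_neg hyx, hv y hy]
            simp [List.count_append, Ne.symm hyx])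
      rw [pvExp_append_singleton]
      simpa [hx, ← hval] using hrec
    · have hcont : counts.contains x = false := by rw [hc x]; simpa using hx
      rw [if_neg (by simp [hcont])]
      have hrec := ih (x :: tail) counts hc (by
        intro y hy
        have hyx : y ≠ x := fun hcc => hx (hcc ▸ hy)
        rw [hv y hy]
        simp [List.count_append, Ne.symm hyx])
      rw [show (ws ++ [x]) ++ tail = ws ++ (x :: tail) by simp, pvExp_append_singleton]
      simpa [hx] using hrec

-- properties of A's filtered-counts dict
theorem pvCounts_items (ys : List String) :
    (((PySem.Dict.counter ys).items.filter (fun kv => decide (1 < kv.2))).foldl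
      (fun (d : PySem.Dict String Int) kv => d.insert kv.1 kv.2) PySem.Dict.empty).items
    = (PySem.Dict.counter ys).items.filter (fun kv => decide (1 < kv.2)) := by
  rw [PySem.Dict.items_foldl_insert_fresh (k := Prod.fst) (v := Prod.snd)]
  · simp [PySem.Dict.empty]
  · intro a _; simp
  · have hk : ((PySem.Dict.counter ys).items.map Prod.fst).Nodup := by
      have := PySem.Dict.nodup_keys_counter (κ := String) ys
      simpa [PySem.Dict.keys] using this
    exact hk.sublist (List.filter_sublist.map _)

theorem pvCounts_contains (ys : List String) (x : String) :
    (((PySem.Dict.counter ys).items.filter (fun kv => decide (1 < kv.2))).foldl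
      (fun (d : PySem.Dict String Int) kv => d.insert kv.1 kv.2) PySem.Dict.empty).contains x
    = decide (1 < (ys.count x : Int)) := by
  rw [PySem.Dict.contains_eq_decide_mem_keys, decide_eq_decide]
  rw [show (((PySem.Dict.counter ys).items.filter (fun kv => decide (1 < kv.2))).foldl
      (fun (d : PySem.Dict String Int) kv => d.insert kv.1 kv.2) PySem.Dict.empty).keys
      = (((PySem.Dict.counter ys).items.filter (fun kv => decide (1 < kv.2))).map Prod.fst) from by
    simp [PySem.Dict.keys, pvCounts_items ys]]
  rw [PySem.Dict.items_counter]
  constructor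
  · intro hmem
    simp only [List.mem_map, List.mem_filter] at hmem
    obtain ⟨kv, ⟨hkv, hgt⟩, hfst⟩ := hmem
    obtain ⟨k, hk, rfl⟩ := hkv
    simp_all
  · intro hgt
    have hmem : x ∈ ys := by
      by_contra hx
      simp [List.count_eq_zero_of_not_mem hx] at hgt
    refine List.mem_map.mpr ⟨(x, (ys.count x : Int)), ?_, rfl⟩
    refine List.mem_filter.mpr ⟨?_, by simpa using hgt⟩
    exact List.mem_map.mpr ⟨x, by simpa using (PySem.Set.mem_ofList _ _).mpr hmem, rfl⟩

theorem pvCounts_getD (ys : List String) (x : String) (hx : 1 < (ys.count x : Int)) :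
    (((PySem.Dict.counter ys).items.filter (fun kv => decide (1 < kv.2))).foldl
      (fun (d : PySem.Dict String Int) kv => d.insert kv.1 kv.2) PySem.Dict.empty).getD x 0
    = (ys.count x : Int) := by
  have hnd : (((PySem.Dict.counter ys).items.filter (fun kv => decide (1 < kv.2))).foldl
      (fun (d : PySem.Dict String Int) kv => d.insert kv.1 kv.2) PySem.Dict.empty).keys.Nodup := by
    have hk : ((PySem.Dict.counter ys).items.map Prod.fst).Nodup := by
      have := PySem.Dict.nodup_keys_counter (κ := String) ys
      simpa [PySem.Dict.keys] using this
    have h2 : (((PySem.Dict.counter ys).items.filter (fun kv => decide (1 < kv.2))).map Prod.fst).Nodup :=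
      hk.sublist (List.filter_sublist.map _)
    simpa [PySem.Dict.keys, pvCounts_items ys] using h2
  refine PySem.Dict.getD_of_mem_items _ ?_ hnd _
  rw [pvCounts_items ys, PySem.Dict.items_counter]
  refine List.mem_filter.mpr ⟨?_, by simpa using hx⟩
  have hmem : x ∈ ys := by
    by_contra hxx
    simp [List.count_eq_zero_of_not_mem hxx] at hx
  exact List.mem_map.mpr ⟨x, by simpa using (PySem.Set.mem_ofList _ _).mpr hmem, rfl⟩

-- ===== B-side machinery: the positions (inverted-index) dict =====

-- the list of positions of x in ys, as Python ints, in increasing order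
def pvPos (ys : List String) (x : String) : List Int :=
  ((PySem.List.enumerate ys).filter (fun p => p.2 == x)).map (fun p => p.1)

theorem pvPos_getD (ys : List String) (x : String) :
    ((PySem.List.enumerate ys).foldl
      (fun (d : PySem.Dict String (List Int)) p => d.modify p.2 [] (· ++ [p.1]))
      PySem.Dict.empty).getD x []
    = pvPos ys x := by
  have h := PySem.Dict.getD_foldl_modify_append
    ((PySem.List.enumerate ys).map Prod.swap) PySem.Dict.empty x
  rw [List.foldl_map] at h
  simp only [Prod.fst_swap, Prod.snd_swap] at h
  rw [h, PySem.Dict.getD_empty]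
  simp [pvPos, List.filter_map, List.map_map, Function.comp_def]

theorem pvPos_mem (ys : List String) (x : String) (j : Nat) (hj : j < ys.length) :
    ((j : Int) ∈ pvPos ys x) ↔ ys[j] = x := by
  simp only [pvPos, List.mem_map, List.mem_filter, PySem.List.mem_enumerate_iff]
  constructor
  · rintro ⟨p, ⟨⟨k, hk, rfl⟩, hx⟩, h1⟩
    simp only [zero_add] at h1 hx
    have : k = j := by omega
    subst this
    simpa using hx
  · intro hx
    exact ⟨((j : Int), ys[j]), ⟨⟨j, hj, by simp⟩, by simpa using hx⟩, rfl⟩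

theorem pvPos_length (ys : List String) (x : String) :
    (pvPos ys x).length = ys.count x := by
  induction ys using List.reverseRecOn with
  | nil => simp [pvPos, PySem.List.enumerate]
  | append_singleton ws y ih =>
    simp only [pvPos, PySem.List.enumerate_append] at *
    by_cases hy : y = x <;>
      simp [PySem.List.enumerate, hy, List.filter_append, List.count_append, ih]

theorem pvPos_sorted (ys : List String) (x : String) :
    (pvPos ys x).Pairwise (· < ·) := by
  refine List.pairwise_map.mpr ?_
  exact (PySem.List.pairwise_lt_enumerate ys 0).filter _

theorem pvPos_nodup (ys : List String) (x : String) : (pvPos ys x).Nodup :=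
  (pvPos_sorted ys x).imp ne_of_lt

theorem pvPos_nonneg (ys : List String) (x : String) : ∀ i ∈ pvPos ys x, 0 ≤ i := by
  intro i hi
  simp only [pvPos, List.mem_map, List.mem_filter, PySem.List.mem_enumerate_iff] at hi
  obtain ⟨p, ⟨⟨k, hk, rfl⟩, -⟩, h1⟩ := hi
  omega

theorem pvPos_idxOf (ys : List String) (x : String) :
    ∀ (j : Nat), (hj : j < ys.length) → ys[j] = x →
      (pvPos ys x).idxOf (j : Int) = (ys.take j).count x := by
  induction ys using List.reverseRecOn with
  | nil => intro j hj; simp at hj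
  | append_singleton ws y ih =>
    intro j hj hx
    have hpos : pvPos (ws ++ [y]) x
        = pvPos ws x ++ (if y = x then [((ws.length : Nat) : Int)] else []) := by
      simp only [pvPos, PySem.List.enumerate_append]
      by_cases hy : y = x <;>
        simp [PySem.List.enumerate, hy, List.filter_append]
    by_cases hcase : j < ws.length
    · have hx' : ws[j] = x := by
        rw [← hx]; simp [List.getElem_append_left hcase]
      have hmem : (j : Int) ∈ pvPos ws x := (pvPos_mem ws x j hcase).mpr hx'
      rw [hpos, List.idxOf_append, if_pos hmem, ih j hcase hx',
        List.take_append_of_le_length (le_of_lt hcase)]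
    · have hj' : j = ws.length := by
        have := hj; simp only [List.length_append, List.length_singleton] at this; omega
      subst hj'
      have hy : y = x := by
        rw [← hx]; simp
      have hnmem : ((ws.length : Nat) : Int) ∉ pvPos ws x := by
        intro hmem
        simp only [pvPos, List.mem_map, List.mem_filter, PySem.List.mem_enumerate_iff] at hmem
        obtain ⟨p, ⟨⟨k, hk, rfl⟩, -⟩, h1⟩ := hmem
        omega
      rw [hpos, List.idxOf_append, if_neg hnmem, if_pos hy]
      simp [pvPos_length, List.take_append_of_le_length (le_refl ws.length)]

-- length preservation of the inner rewrite fold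
theorem pvFold_length (g : Int → String) :
    ∀ (l : List Int) (s : Int) (acc : List String),
      ((PySem.List.enumerate l s).foldl
        (fun acc2 q => PySem.List.pySetD acc2 q.2 (g q.1)) acc).length = acc.length := by
  intro l
  induction l with
  | nil => intro s acc; simp [PySem.List.enumerate]
  | cons i l ih =>
    intro s acc
    rw [PySem.List.enumerate_cons]
    simp only [List.foldl_cons, ih]
    exact PySem.List.length_pySetD acc i (g s)

-- the inner group-rewrite fold, pointwise
theorem pvInner (g : Int → String) :
    ∀ (l : List Int), l.Nodup → (∀ i ∈ l, 0 ≤ i) →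
      ∀ (acc : List String) (j : Nat), j < acc.length →
        ((PySem.List.enumerate l).foldl
          (fun acc2 q => PySem.List.pySetD acc2 q.2 (g q.1)) acc)[j]?
        = if (j : Int) ∈ l then some (g ((l.idxOf (j : Int) : Nat) : Int)) else acc[j]? := by
  intro l
  induction l using List.reverseRecOn with
  | nil => intro _ _ acc j hj; simp [PySem.List.enumerate]
  | append_singleton l a ih =>
    intro hnd hnn acc j hj
    have hnd' : l.Nodup := hnd.sublist (List.sublist_append_left l [a])
    have hna : a ∉ l := by
      have h : (a :: l.reverse).Nodup := by simpa using List.nodup_reverse.mpr hnd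
      have h2 : a ∉ l.reverse := (List.nodup_cons.mp h).1
      simpa using h2
    have hnn' : ∀ i ∈ l, 0 ≤ i := fun i hi => hnn i (by simp [hi])
    have ha0 : 0 ≤ a := hnn a (by simp)
    rw [PySem.List.enumerate_append]
    simp only [PySem.List.enumerate, List.foldl_append, List.foldl_cons, List.foldl_nil]
    have hlen : ((PySem.List.enumerate l 0).foldl
        (fun acc2 q => PySem.List.pySetD acc2 q.2 (g q.1)) acc).length = acc.length :=
      pvFold_length g l 0 acc
    rw [PySem.List.pySetD_of_nonneg _ _ ha0]
    by_cases haj : a = (j : Int)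
    · subst haj
      simp only [Int.toNat_natCast]
      rw [List.getElem?_set_self (by rw [hlen]; exact hj)]
      rw [if_pos (by simp), List.idxOf_append, if_neg hna]
      simp
    · have htn : a.toNat ≠ j := by omega
      rw [List.getElem?_set_ne htn, ih hnd' hnn' acc j hj]
      by_cases hjl : (j : Int) ∈ l
      · rw [if_pos hjl, if_pos (by simp [hjl]), List.idxOf_append, if_pos hjl]
      · rw [if_neg hjl, if_neg (by simp [hjl, Ne.symm haj])]

-- outer fold over the groups, pointwise
theorem pvOuter (ys : List String) :
    ∀ (ks : List String) (acc : List String), acc.length = ys.length →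
      ∀ (j : Nat), (hj : j < ys.length) →
        ((ks.map (fun x => (x, pvPos ys x))).foldl
          (fun acc kv =>
            if decide (1 < kv.2.length) then
              (PySem.List.enumerate kv.2).foldl
                (fun acc2 q => PySem.List.pySetD acc2 q.2 (kv.1 ++ "_" ++ PySem.Int.toStr (q.1 + 1)))
                acc
            else acc) acc)[j]?
        = if ys[j] ∈ ks ∧ 1 < ys.count ys[j]
          then some (ys[j] ++ "_" ++ PySem.Int.toStr (((ys.take j).count ys[j] : Int) + 1))
          else acc[j]? := by
  intro ks
  induction ks with
  | nil => intro acc hlen j hj; simp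
  | cons x ks ih =>
    intro acc hlen j hj
    simp only [List.map_cons, List.foldl_cons]
    by_cases hdup : 1 < (pvPos ys x).length
    · rw [if_pos (by simpa using hdup)]
      have hlen' : ((PySem.List.enumerate (pvPos ys x)).foldl
          (fun acc2 q => PySem.List.pySetD acc2 q.2 (x ++ "_" ++ PySem.Int.toStr (q.1 + 1))) acc).length
          = ys.length :=
        (pvFold_length (fun k => x ++ "_" ++ PySem.Int.toStr (k + 1)) (pvPos ys x) 0 acc).trans hlen
      rw [ih _ hlen' j hj]
      have hinner := pvInner (fun k => x ++ "_" ++ PySem.Int.toStr (k + 1)) (pvPos ys x)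
        (pvPos_nodup ys x) (pvPos_nonneg ys x) acc j (by omega)
      by_cases hks : ys[j] ∈ ks ∧ 1 < ys.count ys[j]
      · rw [if_pos hks, if_pos ⟨by simp [hks.1], hks.2⟩]
      · rw [if_neg hks, hinner]
        by_cases hjx : ys[j] = x
        · have hcnt : 1 < ys.count ys[j] := by rw [hjx, ← pvPos_length]; exact hdup
          rw [if_pos ((pvPos_mem ys x j hj).mpr hjx),
            if_pos ⟨by simp [hjx], hcnt⟩, pvPos_idxOf ys x j hj hjx, hjx]
        · rw [if_neg (fun hmem => hjx ((pvPos_mem ys x j hj).mp hmem)),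
            if_neg (by rintro ⟨hmem, hc⟩; rcases List.mem_cons.mp hmem with h | h;
                       exacts [hjx h, hks ⟨h, hc⟩])]
    · rw [if_neg (by simpa using hdup), ih _ hlen j hj]
      by_cases hjx : ys[j] = x
      · have hcnt : ¬ 1 < ys.count ys[j] := by rw [hjx, ← pvPos_length]; exact hdup
        rw [if_neg (fun h => hcnt h.2), if_neg (fun h => hcnt h.2)]
      · by_cases hks : ys[j] ∈ ks ∧ 1 < ys.count ys[j]
        · rw [if_pos hks, if_pos ⟨by simp [hks.1], hks.2⟩]
        · rw [if_neg hks,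
            if_neg (by rintro ⟨hmem, hc⟩; rcases List.mem_cons.mp hmem with h | h;
                       exacts [hjx h, hks ⟨h, hc⟩])]

-- the positions dict's items are exactly the groups of the distinct labels
theorem pvPositions_items (ys : List String) :
    ((PySem.List.enumerate ys).foldl
      (fun (d : PySem.Dict String (List Int)) p => d.modify p.2 [] (· ++ [p.1]))
      PySem.Dict.empty).items
    = (PySem.Set.ofList ys).map (fun x => (x, pvPos ys x)) := by
  have hkeys : ((PySem.List.enumerate ys).foldl
      (fun (d : PySem.Dict String (List Int)) p => d.modify p.2 [] (· ++ [p.1]))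
      PySem.Dict.empty).keys = PySem.Set.ofList ys := by
    rw [PySem.Dict.keys_foldl_modify_key (PySem.List.enumerate ys) (fun p => p.2) []
      (fun _ p => (· ++ [p.1])) PySem.Dict.empty]
    rw [show (PySem.Dict.empty : PySem.Dict String (List Int)).keys = [] from rfl,
      PySem.Set.update_nil_left, PySem.List.map_snd_enumerate]
  have hnd : ((PySem.List.enumerate ys).foldl
      (fun (d : PySem.Dict String (List Int)) p => d.modify p.2 [] (· ++ [p.1]))
      PySem.Dict.empty).keys.Nodup := by
    exact PySem.Dict.nodup_keys_foldl_modify_key (PySem.List.enumerate ys) (fun p => p.2) []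
      (fun _ p => (· ++ [p.1])) PySem.Dict.empty (by simp [PySem.Dict.keys, PySem.Dict.empty])
  rw [PySem.Dict.items_eq_map_keys _ hnd [], hkeys]
  exact List.map_congr_left fun x _ => by rw [pvPos_getD]

-- outer fold preserves length
theorem pvOuterFold_length :
    ∀ (L : List (String × List Int)) (acc : List String),
      (L.foldl
        (fun acc kv =>
          if decide (1 < kv.2.length) then
            (PySem.List.enumerate kv.2).foldl
              (fun acc2 q => PySem.List.pySetD acc2 q.2 (kv.1 ++ "_" ++ PySem.Int.toStr (q.1 + 1)))
              acc
          else acc) acc).length = acc.length := by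
  intro L
  induction L with
  | nil => intro acc; rfl
  | cons kv L ih =>
    intro acc
    simp only [List.foldl_cons]
    by_cases h : 1 < kv.2.length
    · rw [if_pos (by simpa using h), ih]
      exact pvFold_length (fun k => kv.1 ++ "_" ++ PySem.Int.toStr (k + 1)) kv.2 0 acc
    · rw [if_neg (by simpa using h)]; exact ih acc

-- the two deduplication passes agree
theorem pvPhase2_eq (ys : List String) :
    (((PySem.List.pyRange 0 (ys.length : Int) 1).reverse).foldl
      (fun (st : List String × PySem.Dict String Int) i =>
        let item := PySem.List.pyGetD st.1 i ""
        if st.2.contains item && decide (st.2.getD item 0 ≠ 0) then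
          (st.1.set i.toNat (item ++ "_" ++ PySem.Int.toStr (st.2.getD item 0)),
           st.2.insert item (st.2.getD item 0 - 1))
        else st)
      (ys, ((PySem.Dict.counter ys).items.filter (fun kv => decide (1 < kv.2))).foldl
        (fun (d : PySem.Dict String Int) kv => d.insert kv.1 kv.2) PySem.Dict.empty)).1
    = ((PySem.List.enumerate ys).foldl
        (fun (d : PySem.Dict String (List Int)) p => d.modify p.2 [] (· ++ [p.1]))
        PySem.Dict.empty).items.foldl
      (fun acc kv =>
        if decide (1 < kv.2.length) then
          (PySem.List.enumerate kv.2).foldl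
            (fun acc2 q => PySem.List.pySetD acc2 q.2 (kv.1 ++ "_" ++ PySem.Int.toStr (q.1 + 1)))
            acc
        else acc) ys := by
  have hA := pvA_go (fun x => (ys.count x : Int)) (fun _ => 0) (fun x => le_refl 0) ys []
    (((PySem.Dict.counter ys).items.filter (fun kv => decide (1 < kv.2))).foldl
      (fun (d : PySem.Dict String Int) kv => d.insert kv.1 kv.2) PySem.Dict.empty)
    (pvCounts_contains ys) (fun x hx => by rw [pvCounts_getD ys x hx]; ring)
  rw [List.foldl_reverse, PySem.List.pyRange_one] at *
  simp only [Int.sub_zero, Int.toNat_natCast, zero_add, List.foldr_map, List.append_nil] at hA ⊢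
  rw [hA, pvPositions_items]
  refine List.ext_getElem? fun j => ?_
  by_cases hj : j < ys.length
  · rw [pvExp_getElem? _ _ ys [] j hj,
      pvOuter ys (PySem.Set.ofList ys) ys rfl j hj]
    have hmem : ys[j] ∈ PySem.Set.ofList ys := (PySem.Set.mem_ofList ys _).mpr (ys.getElem_mem hj)
    by_cases hc : 1 < ys.count ys[j]
    · rw [if_pos (show (1 : Int) < (ys.count ys[j] : Int) by exact_mod_cast hc),
        if_pos ⟨hmem, hc⟩]
      simp
    · rw [if_neg (show ¬ (1 : Int) < (ys.count ys[j] : Int) by exact_mod_cast hc),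
        if_neg (fun h => hc h.2), List.getElem?_eq_getElem hj]
  · rw [List.getElem?_eq_none (by rw [pvExp_length]; omega),
      List.getElem?_eq_none (by rw [pvOuterFold_length]; omega)]

-- ===== VERDICT (by name: the statement is the Claim_ definition above) =====
theorem sanitize_header_spec : Claim_equal_sanitize_header := by
  intro labels _hd
  unfold Spec_sanitize_header sanitize_header sanitize_header_alt
  have hnorm : (fun (acc : List String) (p : Int × String) => acc.set p.1.toNat (pvNormalize p.1 p.2))
      = (fun (acc : List String) (p : Int × String) => acc.set p.1.toNat
          (if PySem.Str.strip p.2 ≠ "" then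
            let l1 := PySem.Str.lower p.2
            let l2 := String.ofList (l1.toList.filter (fun c => !(pvPunct.contains c)))
            PySem.Str.replace l2 " " "_"
          else "col_" ++ PySem.Int.toStr p.1)) := by
    funext acc p; rw [pvNormalize_eq]
  simp only [hnorm]
  exact pvPhase2_eq _
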